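-- pv_equiv track=rewrite | github.com/typhasze/traige-gui | src/core_logic.py | _limit_files_by_command_length
-- ===== SOURCE A (Python) =====
-- def _limit_files_by_command_length(filepaths, max_length):
--     """
--     Limit file list to fit within command length constraints.
--     Prioritizes shorter paths and warns user about limitation.
--     """
--     if not filepaths:
--         return []
--
--     # Sort by path length (shorter paths first for efficiency)
--     sorted_files = sorted(filepaths, key=len)
--
--     selected_files = []
--     current_length = 0
--
--     for filepath in sorted_files:
--         file_length = len(filepath) + 3  # +3 for quotes and space
--         if current_length + file_length <= max_length:
--             selected_files.append(filepath)
--             current_length += file_length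
--         else:
--             break
--
--     return selected_files
-- ===== SOURCE B (Python) =====
-- from itertools import accumulate
-- from bisect import bisect_right
--
--
-- def _limit_files_by_command_length(filepaths, max_length):
--     """Prefix-sum table + binary search instead of an accumulate-and-break loop."""
--     sorted_files = sorted(filepaths, key=len)
--     sums = list(accumulate(len(p) + 3 for p in sorted_files))
--     k = bisect_right(sums, max_length)
--     return sorted_files[:k]
-- ===== Notes on version B (the rewrite author's own statement) =====
-- stated objective: alternative
-- what changed: Replaces A's accumulate-and-break loop over the sorted list with a prefix-sum table (itertools.accumulate) plus a binary search (bisect_right) for the largest affordable prefix, then a slice.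
import Mathlib
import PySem

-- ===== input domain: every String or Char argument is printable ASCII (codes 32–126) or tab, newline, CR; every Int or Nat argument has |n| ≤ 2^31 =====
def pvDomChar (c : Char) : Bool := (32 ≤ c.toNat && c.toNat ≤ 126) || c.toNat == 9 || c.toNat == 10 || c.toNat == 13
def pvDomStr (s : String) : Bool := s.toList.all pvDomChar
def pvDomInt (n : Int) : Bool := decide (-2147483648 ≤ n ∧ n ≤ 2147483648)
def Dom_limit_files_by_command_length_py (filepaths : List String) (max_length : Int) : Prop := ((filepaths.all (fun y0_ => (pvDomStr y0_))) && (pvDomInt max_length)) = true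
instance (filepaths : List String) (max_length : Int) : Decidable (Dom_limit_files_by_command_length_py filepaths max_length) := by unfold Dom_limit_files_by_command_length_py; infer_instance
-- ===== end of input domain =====

-- B replaces A's accumulate-and-break loop by a prefix-sum table plus binary search (bisect_right); same return value, different decomposition.
-- ===== PORT A =====
-- the 'for filepath in sorted_files: … else break' loop, with selected_files / current_length as accumulators
def pvLoopA (max_length : Int) : List String → List String → Int → List String
  | [], selected_files, _ => selected_files
  | filepath :: rest, selected_files, current_length =>
    let file_length := PySem.Str.len filepath + 3
    if current_length + file_length ≤ max_length then
      pvLoopA max_length rest (selected_files ++ [filepath]) (current_length + file_length)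
    else
      selected_files

def limit_files_by_command_length_py (filepaths : List String) (max_length : Int) : List String :=
  if filepaths = [] then []
  else
    let sorted_files := PySem.List.sorted filepaths PySem.Str.len
    pvLoopA max_length sorted_files [] 0

-- ===== PORT B =====
-- list(accumulate(len(p) + 3 for p in sorted_files))
def pvSumsB (sorted_files : List String) : List Int :=
  (sorted_files.foldl
    (fun (acc : List Int × Int) p =>
      let s := acc.2 + (PySem.Str.len p + 3)
      (acc.1 ++ [s], s))
    ([], 0)).1

def limit_files_by_command_length_py_alt (filepaths : List String) (max_length : Int) : List String :=
  let sorted_files := PySem.List.sorted filepaths PySem.Str.len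
  let sums := pvSumsB sorted_files
  let k := PySem.List.bisectRight sums max_length
  PySem.List.slice sorted_files none (some (k : Int))

-- ===== PRECONDITION & SPEC =====
def Spec_limit_files_by_command_length_py (filepaths : List String) (max_length : Int) (out : List String) : Prop := out = limit_files_by_command_length_py_alt filepaths max_length
instance (filepaths : List String) (max_length : Int) (out : List String) : Decidable (Spec_limit_files_by_command_length_py filepaths max_length out) := by unfold Spec_limit_files_by_command_length_py; infer_instance

-- ===== CLAIM (what is proved, stated in full; the proofs are below) =====
def Claim_equal_limit_files_by_command_length_py : Prop := ∀ (filepaths : List String) (max_length : Int), Dom_limit_files_by_command_length_py filepaths max_length → Spec_limit_files_by_command_length_py filepaths max_length (limit_files_by_command_length_py filepaths max_length)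

-- ===== LEMMAS AND PROOFS =====

-- ===== VERDICT (by name: the statement is the Claim_ definition above) =====
-- running sums of len p + 3 starting from cur
def pvSumsFrom : List String → Int → List Int
  | [], _ => []
  | p :: r, cur =>
    let s := cur + (PySem.Str.len p + 3)
    s :: pvSumsFrom r s

-- number of iterations A's loop performs before breaking
def pvCount (max_length : Int) : List String → Int → Nat
  | [], _ => 0
  | p :: r, cur =>
    let s := cur + (PySem.Str.len p + 3)
    if s ≤ max_length then pvCount max_length r s + 1 else 0

lemma pvSumsB_foldl (xs : List String) : ∀ (pre : List Int) (cur : Int),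
    (xs.foldl (fun (acc : List Int × Int) p =>
        let s := acc.2 + (PySem.Str.len p + 3)
        (acc.1 ++ [s], s)) (pre, cur)).1 = pre ++ pvSumsFrom xs cur := by
  induction xs with
  | nil => intro pre cur; simp [pvSumsFrom]
  | cons p r ih =>
    intro pre cur
    simp only [List.foldl_cons, pvSumsFrom]
    rw [ih]
    simp

lemma pvSumsB_eq (xs : List String) : pvSumsB xs = pvSumsFrom xs 0 := by
  have h := pvSumsB_foldl xs [] 0
  simpa [pvSumsB] using h

lemma pvSumsFrom_mem_gt (xs : List String) : ∀ (cur t : Int), t ∈ pvSumsFrom xs cur → cur < t := by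
  induction xs with
  | nil => intro cur t h; simp [pvSumsFrom] at h
  | cons p r ih =>
    intro cur t h
    simp only [pvSumsFrom, List.mem_cons] at h
    have h3 : (0:Int) ≤ PySem.Str.len p := by
      simp [PySem.Str.len_eq]
    rcases h with h | h
    · omega
    · have := ih _ _ h; omega

lemma pvSumsFrom_pairwise (xs : List String) : ∀ (cur : Int),
    (pvSumsFrom xs cur).Pairwise (· ≤ ·) := by
  induction xs with
  | nil => intro cur; simp [pvSumsFrom]
  | cons p r ih =>
    intro cur
    simp only [pvSumsFrom, List.pairwise_cons]
    refine ⟨fun t ht => le_of_lt (pvSumsFrom_mem_gt r _ t ht), ih _⟩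

lemma pvSumsFrom_length (xs : List String) : ∀ cur, (pvSumsFrom xs cur).length = xs.length := by
  induction xs with
  | nil => intro cur; simp [pvSumsFrom]
  | cons p r ih => intro cur; simp [pvSumsFrom, ih]

lemma pvCount_le_length (max_length : Int) (xs : List String) : ∀ cur,
    pvCount max_length xs cur ≤ xs.length := by
  induction xs with
  | nil => intro cur; simp [pvCount]
  | cons p r ih =>
    intro cur
    simp only [pvCount, List.length_cons]
    split
    · have := ih (cur + (PySem.Str.len p + 3)); omega
    · omega

-- for a sorted list, bisectRight is the unique split point
lemma pvBisect_unique (xs : List Int) (x : Int) (h : xs.Pairwise (· ≤ ·)) (k : Nat)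
    (hk : k ≤ xs.length)
    (h1 : ∀ (j : Nat) (hj : j < xs.length), j < k → xs[j] ≤ x)
    (h2 : ∀ (j : Nat) (hj : j < xs.length), k ≤ j → x < xs[j]) :
    PySem.List.bisectRight xs x = k := by
  obtain ⟨hb, hb1, hb2⟩ := PySem.List.bisectRight_spec xs x h
  set b := PySem.List.bisectRight xs x with hbdef
  rcases Nat.lt_trichotomy b k with hlt | heq | hgt
  · have hbn : b < xs.length := lt_of_lt_of_le hlt hk
    have := h1 b hbn hlt
    have := hb2 b hbn (le_refl b)
    omega
  · exact heq
  · have hkn : k < xs.length := lt_of_lt_of_le hgt hb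
    have := hb1 k hkn hgt
    have := h2 k hkn (le_refl k)
    omega

lemma pvCount_bounds (max_length : Int) (xs : List String) : ∀ (cur : Int) (j : Nat)
    (hj : j < (pvSumsFrom xs cur).length),
    (j < pvCount max_length xs cur → (pvSumsFrom xs cur)[j] ≤ max_length) ∧
    (pvCount max_length xs cur ≤ j → max_length < (pvSumsFrom xs cur)[j]) := by
  induction xs with
  | nil => intro cur j hj; simp [pvSumsFrom] at hj
  | cons p r ih =>
    intro cur j hj
    by_cases hs : cur + (PySem.Str.len p + 3) ≤ max_length
    · simp only [pvSumsFrom, pvCount, if_pos hs]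
      cases j with
      | zero =>
        exact ⟨fun _ => by simpa using hs, fun h => absurd h (by omega)⟩
      | succ j' =>
        have hj' : j' < (pvSumsFrom r (cur + (PySem.Str.len p + 3))).length := by
          simp only [pvSumsFrom, List.length_cons] at hj; omega
        have h2 := ih (cur + (PySem.Str.len p + 3)) j' hj'
        refine ⟨fun h => ?_, fun h => ?_⟩
        · simpa only [List.getElem_cons_succ] using h2.1 (by omega)
        · simpa only [List.getElem_cons_succ] using h2.2 (by omega)
    · simp only [pvSumsFrom, pvCount, if_neg hs]
      refine ⟨fun h => absurd h (by omega), fun _ => ?_⟩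
      cases j with
      | zero =>
        simp only [List.getElem_cons_zero]; omega
      | succ j' =>
        have hj' : j' < (pvSumsFrom r (cur + (PySem.Str.len p + 3))).length := by
          simp only [pvSumsFrom, List.length_cons] at hj; omega
        simp only [List.getElem_cons_succ]
        have hgt := pvSumsFrom_mem_gt r (cur + (PySem.Str.len p + 3)) _
          (List.getElem_mem hj')
        omega

lemma pvBisect_eq_count (max_length : Int) (xs : List String) (cur : Int) :
    PySem.List.bisectRight (pvSumsFrom xs cur) max_length = pvCount max_length xs cur := by
  apply pvBisect_unique _ _ (pvSumsFrom_pairwise xs cur)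
  · rw [pvSumsFrom_length]; exact pvCount_le_length _ _ _
  · intro j hj h; exact (pvCount_bounds max_length xs cur j hj).1 h
  · intro j hj h; exact (pvCount_bounds max_length xs cur j hj).2 h

lemma pvLoopA_take (max_length : Int) (xs : List String) : ∀ (sel : List String) (cur : Int),
    pvLoopA max_length xs sel cur = sel ++ xs.take (pvCount max_length xs cur) := by
  induction xs with
  | nil => intro sel cur; simp [pvLoopA, pvCount]
  | cons p r ih =>
    intro sel cur
    simp only [pvLoopA, pvCount]
    split
    · rw [ih]; simp
    · simp

theorem limit_files_by_command_length_py_spec : Claim_equal_limit_files_by_command_length_py := by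
  intro filepaths max_length _
  unfold Spec_limit_files_by_command_length_py
  unfold limit_files_by_command_length_py limit_files_by_command_length_py_alt
  have key : ∀ sf : List String,
      pvLoopA max_length sf [] 0 =
        PySem.List.slice sf none (some ((PySem.List.bisectRight (pvSumsB sf) max_length : Nat) : Int)) := by
    intro sf
    rw [pvSumsB_eq, pvBisect_eq_count, PySem.List.slice_to_natCast, pvLoopA_take]
    simp
  split
  · next h =>
    subst h
    rfl
  · show pvLoopA max_length (PySem.List.sorted filepaths PySem.Str.len) [] 0 =
      PySem.List.slice (PySem.List.sorted filepaths PySem.Str.len) none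
        (some ((PySem.List.bisectRight
          (pvSumsB (PySem.List.sorted filepaths PySem.Str.len)) max_length : Nat) : Int))
    exact key _
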